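-- pv_equiv track=rewrite | github.com/techstoa/brewt | brewt.py | case_variants
-- ===== SOURCE A (Python) =====
-- def case_variants(word):
--     """Generate all upper/lower case combinations for a word.
--
--     For example, 'ab' yields 'ab', 'Ab', 'aB', 'AB'.
--     Non-alpha characters contribute only one variant.
--     """
--     from itertools import product
--     char_options = []
--     for ch in word:
--         if ch.isalpha():
--             char_options.append((ch.lower(), ch.upper()))
--         else:
--             char_options.append((ch,))
--     for combo in product(*char_options):
--         yield ''.join(combo)
-- ===== SOURCE B (Python) =====
-- def case_variants(word):
--     """Generate all upper/lower case combinations for a word.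
--
--     Single forward pass: extend every accumulated prefix with each case
--     variant of the next character (no itertools.product, no option list).
--     """
--     acc = ['']
--     for ch in word:
--         if ch.isalpha():
--             opts = [ch.lower(), ch.upper()]
--         else:
--             opts = [ch]
--         acc = [p + o for p in acc for o in opts]
--     yield from acc
-- ===== Notes on version B (the rewrite author's own statement) =====
-- stated objective: alternative
-- what changed: Replaces the build-option-tuples + itertools.product + join pipeline with a single forward pass that extends every accumulated prefix string with each case variant of the next character.
import Mathlib
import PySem

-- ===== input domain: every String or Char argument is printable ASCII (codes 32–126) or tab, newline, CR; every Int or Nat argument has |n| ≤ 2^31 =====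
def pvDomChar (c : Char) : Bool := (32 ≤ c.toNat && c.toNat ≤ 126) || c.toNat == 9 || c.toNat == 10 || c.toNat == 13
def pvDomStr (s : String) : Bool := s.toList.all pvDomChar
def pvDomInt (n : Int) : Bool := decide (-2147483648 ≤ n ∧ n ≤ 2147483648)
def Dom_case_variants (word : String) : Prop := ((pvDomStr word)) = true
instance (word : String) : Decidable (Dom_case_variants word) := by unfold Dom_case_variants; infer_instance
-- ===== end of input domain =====

-- B replaces build-options + itertools.product + join by a single forward prefix-extension pass (alternative decomposition, same cost).

-- ===== PORT A =====
-- transliteration of itertools.product over the option lists (leftmost position varies slowest)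
def pyProduct : List (List String) → List (List String)
  | [] => [[]]
  | o :: rest => o.flatMap (fun x => (pyProduct rest).map (fun t => x :: t))

def case_variants (word : String) : List String :=
  let char_options : List (List String) :=
    word.toList.foldl (fun acc ch =>
      acc ++ [if PySem.Chars.isalpha ch then
                [String.ofList [PySem.Chars.lowerChar ch], String.ofList [PySem.Chars.upperChar ch]]
              else [String.ofList [ch]]]) []
  (pyProduct char_options).map (fun combo => PySem.Str.join "" combo)

-- ===== PORT B =====
def case_variants_alt (word : String) : List String :=
  word.toList.foldl (fun acc ch =>
    acc.flatMap (fun p =>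
      (if PySem.Chars.isalpha ch then
         [String.ofList [PySem.Chars.lowerChar ch], String.ofList [PySem.Chars.upperChar ch]]
       else [String.ofList [ch]]).map (fun o => p ++ o))) [""]

-- ===== PRECONDITION & SPEC =====
def Spec_case_variants (word : String) (out : List String) : Prop := out = case_variants_alt word
instance (word : String) (out : List String) : Decidable (Spec_case_variants word out) := by unfold Spec_case_variants; infer_instance

-- ===== CLAIM (what is proved, stated in full; the proofs are below) =====
def Claim_equal_case_variants : Prop := ∀ (word : String), Dom_case_variants word → Spec_case_variants word (case_variants word)

-- ===== LEMMAS AND PROOFS =====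
def cvOpts (ch : Char) : List String :=
  if PySem.Chars.isalpha ch then
    [String.ofList [PySem.Chars.lowerChar ch], String.ofList [PySem.Chars.upperChar ch]]
  else [String.ofList [ch]]

theorem joinE (x : String) (l : List String) :
    PySem.Str.join "" (x :: l) = x ++ PySem.Str.join "" l := by
  apply String.toList_inj.mp
  cases l <;> simp [PySem.Str.toList_join, PySem.Chars.join_nil, PySem.Chars.join_singleton,
    PySem.Chars.join_cons_cons]

theorem joinN : (PySem.Str.join "" [] : String) = "" := by
  apply String.toList_inj.mp
  simp [PySem.Str.toList_join, PySem.Chars.join_nil]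

theorem options_eq (cs : List Char) (l : List (List String)) :
    cs.foldl (fun acc ch => acc ++ [cvOpts ch]) l = l ++ cs.map cvOpts := by
  induction cs generalizing l with
  | nil => simp
  | cons c cs ih => simp [List.foldl_cons, ih]

theorem fold_eq_product (cs : List Char) (acc : List String) :
    cs.foldl (fun acc ch => acc.flatMap (fun p => (cvOpts ch).map (fun o => p ++ o))) acc
      = acc.flatMap (fun p => (pyProduct (cs.map cvOpts)).map
          (fun combo => p ++ PySem.Str.join "" combo)) := by
  induction cs generalizing acc with
  | nil => simp [pyProduct, joinN]
  | cons c cs ih =>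
      rw [List.foldl_cons, ih]
      simp only [List.map_cons, pyProduct, List.flatMap_assoc, List.map_flatMap,
        List.flatMap_map, List.map_map]
      congr 1; funext p; congr 1; funext x
      simp [joinE, String.append_assoc, Function.comp]

-- ===== VERDICT (by name: the statement is the Claim_ definition above) =====
theorem case_variants_spec : Claim_equal_case_variants := by
  intro word _
  unfold Spec_case_variants case_variants case_variants_alt
  rw [show (fun (acc : List (List String)) (ch : Char) =>
        acc ++ [if PySem.Chars.isalpha ch then
                  [String.ofList [PySem.Chars.lowerChar ch], String.ofList [PySem.Chars.upperChar ch]]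
                else [String.ofList [ch]]]) = fun acc ch => acc ++ [cvOpts ch] from rfl,
      show (fun (acc : List String) (ch : Char) =>
        acc.flatMap (fun p =>
          (if PySem.Chars.isalpha ch then
             [String.ofList [PySem.Chars.lowerChar ch], String.ofList [PySem.Chars.upperChar ch]]
           else [String.ofList [ch]]).map (fun o => p ++ o)))
        = fun acc ch => acc.flatMap (fun p => (cvOpts ch).map (fun o => p ++ o)) from rfl]
  rw [options_eq, fold_eq_product]
  simp
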